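-- pv_equiv track=rewrite | github.com/rutujadugaje/LUNEXA-Auto_reply_chatbot | bot.py | is_last_message_from_sender
-- ===== SOURCE A (Python) =====
-- def is_last_message_from_sender(chat_text: str, sender_name: str = "Vaishnavi") -> bool:
--     """
--     Checks if the last message in the chat log is from the given sender.
--     Works case-insensitively and ignores extra spaces.
--     """
--     lines = [line.strip() for line in chat_text.strip().splitlines() if line.strip()]
--
--     # Go backwards until we find a message line
--     for line in reversed(lines):
--         if "]" in line and ":" in line:
--             try:
--                 sender_part = line.split("]", 1)[1].strip()
--                 sender = sender_part.split(":", 1)[0].strip().lower()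
--                 return sender == sender_name.lower()
--             except:
--                 return False
--     return False
-- ===== SOURCE B (Python) =====
-- def _extract_sender(line: str) -> str:
--     """Normalized sender name of a message-shaped line."""
--     return line.split("]", 1)[1].strip().split(":", 1)[0].strip().lower()
--
-- def is_last_message_from_sender(chat_text: str, sender_name: str = "Vaishnavi") -> bool:
--     """Pipeline decomposition: extract the normalized sender of EVERY
--     message-shaped line into a list, then compare the final entry."""
--     lines = [line.strip() for line in chat_text.strip().splitlines() if line.strip()]
--     senders = [_extract_sender(line) for line in lines if "]" in line and ":" in line]
--     return senders[-1] == sender_name.lower() if senders else False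
-- ===== Notes on version B (the rewrite author's own statement) =====
-- stated objective: alternative
-- what changed: B replaces A's reverse search-and-inline-parse (find the last message line, parse it, early return) by a staged pipeline that maps a sender-extraction helper over all message-shaped lines and compares the last extracted sender.
import Mathlib
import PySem

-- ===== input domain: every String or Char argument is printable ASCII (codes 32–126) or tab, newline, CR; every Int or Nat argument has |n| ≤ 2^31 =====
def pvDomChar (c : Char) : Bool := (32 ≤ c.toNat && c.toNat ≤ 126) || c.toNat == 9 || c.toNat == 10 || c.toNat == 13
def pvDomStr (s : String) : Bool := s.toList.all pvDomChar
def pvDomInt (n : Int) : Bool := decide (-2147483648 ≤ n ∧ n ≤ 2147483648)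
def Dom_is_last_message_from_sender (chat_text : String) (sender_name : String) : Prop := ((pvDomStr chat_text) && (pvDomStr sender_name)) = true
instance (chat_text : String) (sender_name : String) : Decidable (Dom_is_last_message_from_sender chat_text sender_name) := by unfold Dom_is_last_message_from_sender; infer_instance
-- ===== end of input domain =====

-- B replaces A's reverse search with inline parse by a staged pipeline: extract the
-- normalized sender of every message-shaped line, then compare the last one (alternative decomposition, same cost).


-- shared first line of both Pythons: [line.strip() for line in chat_text.strip().splitlines() if line.strip()]
def pvLines (chat_text : String) : List String :=
  (PySem.Str.splitlines (PySem.Str.strip chat_text)).filterMap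
    (fun line => let s := PySem.Str.strip line; if s ≠ "" then some s else none)

-- '"]" in line and ":" in line'
def pvCond (line : String) : Bool :=
  PySem.Str.isIn "]" line && PySem.Str.isIn ":" line

-- ===== PORT A =====
-- the try/except body: line.split("]",1)[1].strip().split(":",1)[0].strip().lower() == sender_name.lower(); except → False
def pvParse (line : String) (sender_name : String) : Bool :=
  match PySem.Str.splitMax? line "]" 1 with
  | none => false        -- except (unreachable: sep ≠ "")
  | some parts =>
    match PySem.List.pyGet? parts 1 with
    | none => false      -- IndexError → except → False
    | some p1 =>
      match PySem.Str.splitMax? (PySem.Str.strip p1) ":" 1 with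
      | none => false    -- except (unreachable: sep ≠ "")
      | some parts2 =>
        match PySem.List.pyGet? parts2 0 with
        | none => false  -- IndexError → except → False
        | some p0 =>
          PySem.Str.lower (PySem.Str.strip p0) == PySem.Str.lower sender_name

-- A's loop: for line in reversed(lines): if cond: return parse; after loop: return False
def pvScanRev (sender_name : String) : List String → Bool
  | [] => false
  | l :: rest => if pvCond l then pvParse l sender_name else pvScanRev sender_name rest

def is_last_message_from_sender (chat_text : String) (sender_name : String) : Bool :=
  pvScanRev sender_name (pvLines chat_text).reverse

-- ===== PORT B =====
-- _extract_sender: the same string chain as a total helper (none = the unreachable IndexError)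
def pvExtract (line : String) : Option String :=
  match PySem.Str.splitMax? line "]" 1 with
  | none => none
  | some parts =>
    match PySem.List.pyGet? parts 1 with
    | none => none
    | some p1 =>
      match PySem.Str.splitMax? (PySem.Str.strip p1) ":" 1 with
      | none => none
      | some parts2 =>
        match PySem.List.pyGet? parts2 0 with
        | none => none
        | some p0 => some (PySem.Str.lower (PySem.Str.strip p0))

-- senders = [_extract_sender(l) for l in lines if cond(l)]; senders[-1] == sender_name.lower() if senders else False
def is_last_message_from_sender_alt (chat_text : String) (sender_name : String) : Bool :=
  let senders := ((pvLines chat_text).filter pvCond).map pvExtract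
  match senders.getLast? with
  | none => false
  | some none => false   -- Python would raise here; unreachable since every filtered line contains "]"
  | some (some s) => s == PySem.Str.lower sender_name

-- ===== PRECONDITION & SPEC =====
def Spec_is_last_message_from_sender (chat_text : String) (sender_name : String) (out : Bool) : Prop := out = is_last_message_from_sender_alt chat_text sender_name
instance (chat_text : String) (sender_name : String) (out : Bool) : Decidable (Spec_is_last_message_from_sender chat_text sender_name out) := by unfold Spec_is_last_message_from_sender; infer_instance

-- ===== CLAIM (what is proved, stated in full; the proofs are below) =====
def Claim_equal_is_last_message_from_sender : Prop := ∀ (chat_text : String) (sender_name : String), Dom_is_last_message_from_sender chat_text sender_name → Spec_is_last_message_from_sender chat_text sender_name (is_last_message_from_sender chat_text sender_name)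

-- ===== LEMMAS AND PROOFS =====

-- A's reverse scan is: parse the first cond-match of the scanned list, else False
theorem pvScanRev_eq_find (sender_name : String) (xs : List String) :
    pvScanRev sender_name xs = ((xs.find? pvCond).map (fun l => pvParse l sender_name)).getD false := by
  induction xs with
  | nil => rfl
  | cons l rest ih =>
    by_cases h : pvCond l = true
    · simp [pvScanRev, List.find?, h]
    · simp [pvScanRev, List.find?, h, ih]

-- the first filtered element is the first match
theorem head?_filter_eq_find? (p : String → Bool) (xs : List String) :
    (xs.filter p).head? = xs.find? p := by
  induction xs with
  | nil => rfl
  | cons l rest ih =>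
    by_cases h : p l = true
    · simp [List.find?, h]
    · simp [List.find?, h, ih]

-- hence the LAST filtered element is the first match of the reverse
theorem getLast?_filter_eq_find_reverse (p : String → Bool) (xs : List String) :
    (xs.filter p).getLast? = xs.reverse.find? p := by
  rw [List.getLast?_eq_head?_reverse, ← List.filter_reverse, head?_filter_eq_find? p xs.reverse]

-- A's inline parse = B's extraction followed by the comparison
theorem pvParse_eq_extract (l sn : String) :
    pvParse l sn = (match pvExtract l with
      | none => false
      | some s => s == PySem.Str.lower sn) := by
  unfold pvParse pvExtract
  cases PySem.Str.splitMax? l "]" 1 with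
  | none => rfl
  | some parts =>
    cases h2 : PySem.List.pyGet? parts 1 with
    | none => simp [h2]
    | some p1 =>
      cases h3 : PySem.Str.splitMax? (PySem.Str.strip p1) ":" 1 with
      | none => simp [h2, h3]
      | some parts2 =>
        cases h4 : PySem.List.pyGet? parts2 0 <;> simp [h2, h3, h4]

theorem is_last_message_from_sender_eq (chat_text sender_name : String) :
    is_last_message_from_sender chat_text sender_name
      = is_last_message_from_sender_alt chat_text sender_name := by
  unfold is_last_message_from_sender is_last_message_from_sender_alt
  rw [pvScanRev_eq_find]
  simp only [List.getLast?_map, getLast?_filter_eq_find_reverse]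
  cases h : (pvLines chat_text).reverse.find? pvCond with
  | none => rfl
  | some l =>
    simp only [Option.map_some, Option.getD_some, pvParse_eq_extract]
    cases pvExtract l <;> rfl

-- ===== VERDICT (by name: the statement is the Claim_ definition above) =====
theorem is_last_message_from_sender_spec : Claim_equal_is_last_message_from_sender := by
  intro chat_text sender_name _
  unfold Spec_is_last_message_from_sender
  exact is_last_message_from_sender_eq chat_text sender_name
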